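-- pv_equiv track=rewrite | github.com/raghu1199/DS-ALGO-COMPTETIVE_CODING- | COMPETETIVE_CODES/DSASHEET/revise.py | buyndsellMultipleTimes
-- ===== SOURCE A (Python) =====
-- def buyndsellMultipleTimes(arr):
--     n=len(arr)
--     l,r=0,1
--     res=[]
--     prev=0
--     while r<=n-1:
--         profit=arr[r]-arr[l]
--         if profit>prev:
--             prev=profit
--             if r==n-1:
--                 res.append([l,r])
--         elif r-1!=l:
--             res.append([l,r-1])
--             prev=0
--             l=r
--         if profit<=0:
--             prev=0
--             l=r
--         r+=1
--
--     return res
-- ===== SOURCE B (Python) =====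
-- def buyndsellMultipleTimes(arr):
--     n = len(arr)
--     # pass 1: indices i where arr[i] < arr[i+1]
--     edges = [i for i in range(n - 1) if arr[i] < arr[i + 1]]
--     # pass 2: merge maximal runs of consecutive edge indices
--     res = []
--     cur = None  # (first, last) edge of the current consecutive group
--     for e in edges:
--         if cur is None:
--             cur = (e, e)
--         elif e == cur[1] + 1:
--             cur = (cur[0], e)
--         else:
--             res.append([cur[0], cur[1] + 1])
--             cur = (e, e)
--     if cur is not None:
--         res.append([cur[0], cur[1] + 1])
--     return res
-- ===== Notes on version B (the rewrite author's own statement) =====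
-- stated objective: alternative
-- what changed: A's single stateful scan tracking (l, prev-profit) with in-loop append logic is replaced by two passes: collect all indices i with arr[i] < arr[i+1], then merge maximal runs of consecutive indices into [start, end] intervals.
import Mathlib
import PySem

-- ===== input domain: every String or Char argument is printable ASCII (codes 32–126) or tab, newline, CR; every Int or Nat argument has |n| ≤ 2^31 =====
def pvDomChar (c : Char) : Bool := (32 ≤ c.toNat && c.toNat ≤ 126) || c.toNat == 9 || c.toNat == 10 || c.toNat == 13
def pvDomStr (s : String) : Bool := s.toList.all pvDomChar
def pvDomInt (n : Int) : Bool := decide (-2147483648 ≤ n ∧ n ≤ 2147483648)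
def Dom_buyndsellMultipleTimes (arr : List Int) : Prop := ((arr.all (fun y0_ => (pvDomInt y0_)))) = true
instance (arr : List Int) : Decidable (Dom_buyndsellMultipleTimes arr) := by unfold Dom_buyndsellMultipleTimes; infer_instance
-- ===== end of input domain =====

-- B re-implements A as two passes (collect rise indices, then merge consecutive groups)
-- instead of A's single stateful profit-tracking scan; same output, same O(n) cost.

-- ===== PORT A =====
-- A's while loop over r with state (l, prev, res). Python's l and r start at 0 and 1
-- and only ever grow (l := r), so Nat counters render them exactly; the guard
-- r <= n-1 over Python ints is exactly r < n. arr[l], arr[r] always have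
-- 0 ≤ index < n here, so List.getD is exact.
def loopA (arr : List Int) (l r : Nat) (prev : Int) (res : List (List Int)) :
    List (List Int) :=
  if r < arr.length then
    let profit := arr.getD r 0 - arr.getD l 0
    let s1 : Int × Nat × List (List Int) :=
      if profit > prev then
        (profit, l, if r = arr.length - 1 then res ++ [[(l : Int), (r : Int)]] else res)
      else if r - 1 ≠ l then
        (0, r, res ++ [[(l : Int), (r : Int) - 1]])
      else
        (prev, l, res)
    let s2 : Int × Nat := if profit ≤ 0 then ((0 : Int), r) else (s1.1, s1.2.1)
    loopA arr s2.2 (r + 1) s2.1 s1.2.2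
  else res
termination_by arr.length - r

def buyndsellMultipleTimes (arr : List Int) : List (List Int) :=
  loopA arr 0 1 0 []

-- ===== PORT B =====
-- pass 1 of Source B: [i for i in range(n-1) if arr[i] < arr[i+1]]
def edgesB (arr : List Int) : List Nat :=
  (List.range (arr.length - 1)).filter (fun i => arr.getD i 0 < arr.getD (i + 1) 0)

-- pass 2 of Source B: fold one edge into (res, cur)
def stepB (st : List (List Int) × Option (Nat × Nat)) (e : Nat) :
    List (List Int) × Option (Nat × Nat) :=
  match st with
  | (res, none) => (res, some (e, e))
  | (res, some (f, l)) =>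
    if e = l + 1 then (res, some (f, e))
    else (res ++ [[(f : Int), (l : Int) + 1]], some (e, e))

def buyndsellMultipleTimes_alt (arr : List Int) : List (List Int) :=
  match (edgesB arr).foldl stepB ([], none) with
  | (res, none) => res
  | (res, some (f, l)) => res ++ [[(f : Int), (l : Int) + 1]]

-- ===== PRECONDITION & SPEC =====
def Spec_buyndsellMultipleTimes (arr : List Int) (out : List (List Int)) : Prop := out = buyndsellMultipleTimes_alt arr
instance (arr : List Int) (out : List (List Int)) : Decidable (Spec_buyndsellMultipleTimes arr out) := by unfold Spec_buyndsellMultipleTimes; infer_instance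

-- ===== CLAIM (what is proved, stated in full; the proofs are below) =====
def Claim_equal_buyndsellMultipleTimes : Prop := ∀ (arr : List Int), Dom_buyndsellMultipleTimes arr → Spec_buyndsellMultipleTimes arr (buyndsellMultipleTimes arr)

-- ===== LEMMAS AND PROOFS =====

-- common intermediate: deferred-flush grouping over the booleans arr[i] < arr[i+1]
def G : List Bool → Nat → List (List Int) → Option (Nat × Nat) → List (List Int)
  | [], _, res, none => res
  | [], _, res, some (f, l) => res ++ [[(f : Int), (l : Int) + 1]]
  | b :: bs, p, res, cur =>
    if b then
      match cur with
      | none => G bs (p + 1) res (some (p, p))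
      | some (f, l) =>
        if p = l + 1 then G bs (p + 1) res (some (f, p))
        else G bs (p + 1) (res ++ [[(f : Int), (l : Int) + 1]]) (some (p, p))
    else G bs (p + 1) res cur

def bsFrom (arr : List Int) (p : Nat) : List Bool :=
  (List.range' p (arr.length - 1 - p)).map (fun i => decide (arr.getD i 0 < arr.getD (i + 1) 0))

lemma G_stale (bs : List Bool) : ∀ (p : Nat) (res : List (List Int)) (f l : Nat),
    l + 1 < p → G bs p res (some (f, l)) = G bs p (res ++ [[(f : Int), (l : Int) + 1]]) none := by
  induction bs with
  | nil => intro p res f l h; simp [G]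
  | cons b bs ih =>
    intro p res f l h
    by_cases hb : b = true
    · subst hb
      have hne : p ≠ l + 1 := by omega
      simp [G, hne]
    · simp at hb; subst hb
      simp [G]
      exact ih (p + 1) res f l (by omega)

lemma B_bridge (pred : Nat → Bool) : ∀ (k p : Nat) (res : List (List Int)) (cur : Option (Nat × Nat)),
    (match List.foldl stepB (res, cur) ((List.range' p k).filter pred) with
      | (res, none) => res
      | (res, some (f, l)) => res ++ [[(f : Int), (l : Int) + 1]])
    = G ((List.range' p k).map pred) p res cur := by
  intro k
  induction k with
  | zero => intro p res cur; cases cur with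
    | none => simp [G]
    | some fl => cases fl; simp [G]
  | succ k ih =>
    intro p res cur
    rw [List.range'_succ, List.map_cons, List.filter_cons]
    cases cur with
    | none =>
      by_cases hp : pred p
      · simpa [hp, stepB, G] using ih (p + 1) res (some (p, p))
      · simpa [hp, G] using ih (p + 1) res none
    | some fl =>
      obtain ⟨f, l⟩ := fl
      by_cases hp : pred p
      · by_cases he : p = l + 1
        · subst he
          simpa [hp, stepB, G] using ih (l + 1 + 1) res (some (f, l + 1))
        · simpa [hp, stepB, he, G] using ih (p + 1) (res ++ [[(f : Int), (l : Int) + 1]]) (some (p, p))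
      · simpa [hp, G] using ih (p + 1) res (some (f, l))

lemma bsFrom_cons (arr : List Int) (p : Nat) (h : p + 1 < arr.length) :
    bsFrom arr p = decide (arr.getD p 0 < arr.getD (p + 1) 0) :: bsFrom arr (p + 1) := by
  unfold bsFrom
  have h1 : arr.length - 1 - p = (arr.length - 1 - (p + 1)) + 1 := by omega
  rw [h1, List.range'_succ, List.map_cons]

lemma bsFrom_nil (arr : List Int) (p : Nat) (h : arr.length ≤ p + 1) : bsFrom arr p = [] := by
  unfold bsFrom
  have h1 : arr.length - 1 - p = 0 := by omega
  rw [h1]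
  rfl

lemma A_bridge : ∀ (m : Nat) (arr : List Int) (l p : Nat) (res : List (List Int)),
    m = arr.length - (p + 1) → l ≤ p →
    arr.getD l 0 ≤ arr.getD p 0 →
    (l < p → p + 1 < arr.length) →
    loopA arr l (p + 1) (arr.getD p 0 - arr.getD l 0) res
      = G (bsFrom arr p) p res (if l = p then none else some (l, p - 1)) := by
  intro m
  induction m with
  | zero =>
    intro arr l p res hm hlp _ h4
    have hn : arr.length ≤ p + 1 := by omega
    have hl : l = p := by
      by_contra hne
      have := h4 (by omega)
      omega
    rw [loopA, if_neg (by omega), bsFrom_nil arr p hn, hl]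
    simp [G]
  | succ m ih =>
    intro arr l p res hm hlp hmono h4
    have hr : p + 1 < arr.length := by omega
    rw [loopA, if_pos hr, bsFrom_cons arr p hr]
    by_cases hb : arr.getD p 0 < arr.getD (p + 1) 0
    · -- rising edge at p: the run grows
      have hbt : decide (arr.getD p 0 < arr.getD (p + 1) 0) = true := decide_eq_true hb
      rw [hbt]
      have hgt : arr.getD (p + 1) 0 - arr.getD l 0 > arr.getD p 0 - arr.getD l 0 := by omega
      have hpos : ¬ (arr.getD (p + 1) 0 - arr.getD l 0 ≤ 0) := by omega
      simp only [if_pos hgt, if_neg hpos]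
      by_cases hlast : p + 2 < arr.length
      · have hne : ¬ (p + 1 = arr.length - 1) := by omega
        simp only [if_neg hne]
        have hih := ih arr l (p + 1) res (by omega) (by omega) (by omega) (fun _ => hlast)
        rw [hih, if_neg (by omega : ¬ l = p + 1)]
        by_cases hl : l = p
        · subst hl
          simp [G]
        · have hp1 : (p - 1) + 1 = p := by omega
          simp [G, if_neg hl, hp1]
      · -- p+1 is the last index: A appends [l, p+1] inside the loop
        have heq : p + 1 = arr.length - 1 := by omega
        simp only [if_pos heq]
        rw [loopA, if_neg (by omega), bsFrom_nil arr (p + 1) (by omega)]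
        by_cases hl : l = p
        · subst hl
          simp [G]
        · have hp1 : (p - 1) + 1 = p := by omega
          simp [G, if_neg hl, hp1]
    · -- no rise at p: the run (if any) is flushed and restarts at p+1
      have hbf : decide (arr.getD p 0 < arr.getD (p + 1) 0) = false := by
        simpa using hb
      rw [hbf]
      have hgt : ¬ (arr.getD (p + 1) 0 - arr.getD l 0 > arr.getD p 0 - arr.getD l 0) := by omega
      simp only [if_neg hgt]
      by_cases hl : l = p
      · -- fresh state: nothing to flush
        subst hl
        have hle : arr.getD (l + 1) 0 - arr.getD l 0 ≤ 0 := by omega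
        simp only [if_neg (by omega : ¬ (l + 1 - 1 ≠ l)), if_pos hle]
        have hih := ih arr (l + 1) (l + 1) res (by omega) (le_refl _) (le_refl _) (by omega)
        rw [sub_self] at hih
        rw [hih, if_pos rfl]
        simp [G]
      · -- active run l..p of length ≥ 2: A appends [l, p] now, G flushes it lazily
        simp only [if_pos (by omega : p + 1 - 1 ≠ l)]
        have h0 : (0 : Int) = arr.getD (p + 1) 0 - arr.getD (p + 1) 0 := by ring
        have hih := ih arr (p + 1) (p + 1) (res ++ [[(l : Int), ((p : Nat) + 1 : Int) - 1]]) (by omega) (le_refl _) (le_refl _) (by omega)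
        rw [if_pos rfl] at hih
        have hmain : loopA arr (if arr.getD (p + 1) 0 - arr.getD l 0 ≤ 0 then ((0 : Int), p + 1) else ((0 : Int), p + 1)).2 (p + 1 + 1)
            ((if arr.getD (p + 1) 0 - arr.getD l 0 ≤ 0 then ((0 : Int), p + 1) else ((0 : Int), p + 1)).1)
            (res ++ [[(l : Int), ((p : Nat) + 1 : Int) - 1]])
              = G (bsFrom arr (p + 1)) (p + 1) (res ++ [[(l : Int), ((p : Nat) + 1 : Int) - 1]]) none := by
          split_ifs with h <;> · rw [h0]; exact hih
        simp only [Nat.cast_add, Nat.cast_one] at hmain ⊢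
        rw [hmain]
        have hp1 : (p - 1) + 1 = p := by omega
        simp only [G, Bool.false_eq_true, if_false, if_neg hl]
        rw [G_stale (bsFrom arr (p + 1)) (p + 1) res l (p - 1) (by omega)]
        have hcast : ((p - 1 : Nat) : Int) + 1 = (p : Int) + 1 - 1 := by omega
        rw [hcast]

-- ===== VERDICT (by name: the statement is the Claim_ definition above) =====
theorem buyndsellMultipleTimes_spec : Claim_equal_buyndsellMultipleTimes := by
  intro arr _
  unfold Spec_buyndsellMultipleTimes
  have hA : buyndsellMultipleTimes arr = G (bsFrom arr 0) 0 [] none := by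
    unfold buyndsellMultipleTimes
    have h := A_bridge (arr.length - 1) arr 0 0 [] (by omega) (le_refl _) (le_refl _) (by omega)
    rw [sub_self, if_pos rfl] at h
    exact h
  have hB : buyndsellMultipleTimes_alt arr = G (bsFrom arr 0) 0 [] none := by
    have h2 := B_bridge (fun i => decide (arr.getD i 0 < arr.getD (i + 1) 0)) (arr.length - 1) 0 [] none
    unfold buyndsellMultipleTimes_alt edgesB bsFrom
    rw [List.range_eq_range', Nat.sub_zero]
    exact h2
  rw [hA, hB]
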